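-- pv_equiv track=rewrite | github.com/hanchangha1127/Code-Learning-Platform | server/features/learning/generator_normalize.py | _normalize_code_blame_commit_reviews
-- ===== SOURCE A (Python) =====
-- from typing import Any
--
-- def _normalize_code_blame_commit_reviews(value: Any, option_ids: list[str]) -> list[dict[str, str]]:
--     cleaned: list[dict[str, str]] = []
--     if isinstance(value, list):
--         for entry in value:
--             if not isinstance(entry, dict):
--                 continue
--             option_id = str(entry.get("option_id") or entry.get("optionId") or "").strip().upper()
--             if option_id not in option_ids:
--                 continue
--             summary = str(entry.get("summary") or "").strip()
--             if not summary:
--                 continue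
--             cleaned.append({"optionId": option_id, "summary": summary})
--
--     by_id = {row["optionId"]: row["summary"] for row in cleaned}
--     normalized: list[dict[str, str]] = []
--     for option_id in option_ids:
--         summary = by_id.get(option_id) or f"{option_id} 커밋의 위험도를 다시 점검하세요."
--         normalized.append({"optionId": option_id, "summary": summary})
--     return normalized
-- ===== SOURCE B (Python) =====
-- def _entry_option_id(entry) -> str:
--     return str(entry.get("option_id") or entry.get("optionId") or "").strip().upper()
--
--
-- def _entry_summary(entry) -> str:
--     return str(entry.get("summary") or "").strip()
--
--
-- def _summary_for(option_id: str, value) -> str: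
--     summary = f"{option_id} 커밋의 위험도를 다시 점검하세요."
--     if isinstance(value, list):
--         for entry in value:
--             if not isinstance(entry, dict):
--                 continue
--             if _entry_option_id(entry) != option_id:
--                 continue
--             s = _entry_summary(entry)
--             if s:
--                 summary = s
--     return summary
--
--
-- def _normalize_code_blame_commit_reviews(value, option_ids):
--     return [{"optionId": o, "summary": _summary_for(o, value)} for o in option_ids]
-- ===== Notes on version B (the rewrite author's own statement) =====
-- stated objective: simpler
-- what changed: Replaces A's three passes (build a cleaned list, index it into a by_id dict with last-match-wins, then look each option_id up) with a direct per-option_id scan of the entries that overwrites the default with the last matching non-empty summary.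
import Mathlib
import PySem

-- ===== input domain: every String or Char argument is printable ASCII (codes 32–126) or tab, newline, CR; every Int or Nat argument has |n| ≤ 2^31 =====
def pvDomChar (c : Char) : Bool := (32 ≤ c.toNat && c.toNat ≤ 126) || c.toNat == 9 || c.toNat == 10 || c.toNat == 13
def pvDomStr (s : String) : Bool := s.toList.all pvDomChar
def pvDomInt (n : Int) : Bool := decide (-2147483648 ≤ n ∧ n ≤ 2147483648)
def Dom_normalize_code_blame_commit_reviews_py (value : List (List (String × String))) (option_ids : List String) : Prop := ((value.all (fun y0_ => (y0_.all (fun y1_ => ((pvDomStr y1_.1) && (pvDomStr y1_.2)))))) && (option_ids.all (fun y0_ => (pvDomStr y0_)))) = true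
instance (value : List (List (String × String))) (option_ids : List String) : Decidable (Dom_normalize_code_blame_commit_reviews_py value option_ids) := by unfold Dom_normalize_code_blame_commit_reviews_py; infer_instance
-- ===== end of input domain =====

-- B replaces A's cleaned-list + dict index with a direct per-option_id scan of the entries
-- (last matching non-empty summary wins); objective: simpler, same observable result.

-- entry.get(k) : first-match lookup in the association list (Python dict has unique keys)
def pvAGet (e : List (String × String)) (k : String) : Option String :=
  (e.find? (fun p => p.1 == k)).map (·.2)

-- Python's `a or b` for a string-or-None left operand (None and "" are falsy)
def pyOrS (a : Option String) (b : String) : String :=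
  match a with
  | some s => if s = "" then b else s
  | none => b

-- ===== PORT A =====
def normalize_code_blame_commit_reviews_py (value : List (List (String × String))) (option_ids : List String) : List (List (String × String)) :=
  let cleaned : List (List (String × String)) :=
    value.foldl (fun acc entry =>
      let option_id := PySem.Str.upper (PySem.Str.strip
        (pyOrS (pvAGet entry "option_id") (pyOrS (pvAGet entry "optionId") "")))
      if option_ids.contains option_id then
        let summary := PySem.Str.strip (pyOrS (pvAGet entry "summary") "")
        if summary = "" then acc
        else acc ++ [[("optionId", option_id), ("summary", summary)]]
      else acc) []
  -- row["optionId"] / row["summary"]: both keys are present in every cleaned row, so getD is exact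
  let by_id : PySem.Dict String String :=
    cleaned.foldl (fun d row =>
      d.insert ((pvAGet row "optionId").getD "") ((pvAGet row "summary").getD "")) PySem.Dict.empty
  option_ids.foldl (fun acc option_id =>
    let summary := pyOrS (by_id.get? option_id) (option_id ++ " 커밋의 위험도를 다시 점검하세요.")
    acc ++ [[("optionId", option_id), ("summary", summary)]]) []

-- ===== PORT B =====
def pvEntryOptionId (entry : List (String × String)) : String :=
  PySem.Str.upper (PySem.Str.strip
    (pyOrS (pvAGet entry "option_id") (pyOrS (pvAGet entry "optionId") "")))

def pvEntrySummary (entry : List (String × String)) : String :=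
  PySem.Str.strip (pyOrS (pvAGet entry "summary") "")

def pvSummaryFor (option_id : String) (value : List (List (String × String))) : String :=
  value.foldl (fun summary entry =>
    if pvEntryOptionId entry = option_id then
      let s := pvEntrySummary entry
      if s = "" then summary else s
    else summary)
    (option_id ++ " 커밋의 위험도를 다시 점검하세요.")

def normalize_code_blame_commit_reviews_py_alt (value : List (List (String × String))) (option_ids : List String) : List (List (String × String)) :=
  option_ids.map (fun o => [("optionId", o), ("summary", pvSummaryFor o value)])

-- ===== PRECONDITION & SPEC =====
def Spec_normalize_code_blame_commit_reviews_py (value : List (List (String × String))) (option_ids : List String) (out : List (List (String × String))) : Prop := out = normalize_code_blame_commit_reviews_py_alt value option_ids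
instance (value : List (List (String × String))) (option_ids : List String) (out : List (List (String × String))) : Decidable (Spec_normalize_code_blame_commit_reviews_py value option_ids out) := by unfold Spec_normalize_code_blame_commit_reviews_py; infer_instance

-- ===== CLAIM (what is proved, stated in full; the proofs are below) =====
def Claim_equal_normalize_code_blame_commit_reviews_py : Prop := ∀ (value : List (List (String × String))) (option_ids : List String), Dom_normalize_code_blame_commit_reviews_py value option_ids → Spec_normalize_code_blame_commit_reviews_py value option_ids (normalize_code_blame_commit_reviews_py value option_ids)

-- ===== LEMMAS AND PROOFS =====

-- the entries A keeps in `cleaned`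
def pvKeep (option_ids : List String) (entry : List (String × String)) : Bool :=
  option_ids.contains (pvEntryOptionId entry) && !(pvEntrySummary entry == "")

lemma pv_cleaned_eq (value : List (List (String × String))) (option_ids : List String) :
    value.foldl (fun acc entry =>
      let option_id := PySem.Str.upper (PySem.Str.strip
        (pyOrS (pvAGet entry "option_id") (pyOrS (pvAGet entry "optionId") "")))
      if option_ids.contains option_id then
        let summary := PySem.Str.strip (pyOrS (pvAGet entry "summary") "")
        if summary = "" then acc
        else acc ++ [[("optionId", option_id), ("summary", summary)]]
      else acc) []
    = (value.filter (pvKeep option_ids)).map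
        (fun e => [("optionId", pvEntryOptionId e), ("summary", pvEntrySummary e)]) := by
  have hstep : (fun (acc : List (List (String × String))) entry =>
      let option_id := PySem.Str.upper (PySem.Str.strip
        (pyOrS (pvAGet entry "option_id") (pyOrS (pvAGet entry "optionId") "")))
      if option_ids.contains option_id then
        let summary := PySem.Str.strip (pyOrS (pvAGet entry "summary") "")
        if summary = "" then acc
        else acc ++ [[("optionId", option_id), ("summary", summary)]]
      else acc)
    = (fun acc e => if pvKeep option_ids e then
        acc ++ [[("optionId", pvEntryOptionId e), ("summary", pvEntrySummary e)]] else acc) := by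
    funext acc e
    simp only [pvKeep, pvEntryOptionId, pvEntrySummary]
    by_cases h1 : PySem.Str.upper (PySem.Str.strip
        (pyOrS (pvAGet e "option_id") (pyOrS (pvAGet e "optionId") ""))) ∈ option_ids
    · by_cases h2 : PySem.Str.strip (pyOrS (pvAGet e "summary") "") = ""
      · simp [h1, h2]
      · simp [h1, h2]
    · simp [h1]
  rw [hstep, PySem.List.foldl_append_if]
  simp

-- looking the dict up afterwards (with `or` defaulting) is the running-overwrite loop
lemma pv_dict_fold (l : List (List (String × String))) (oid c : String)
    (hne : ∀ e ∈ l, pvEntrySummary e ≠ "") :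
    ∀ d : PySem.Dict String String,
    pyOrS ((l.foldl (fun d e => d.insert (pvEntryOptionId e) (pvEntrySummary e)) d).get? oid) c
    = l.foldl (fun summary e =>
        if pvEntryOptionId e = oid then
          if pvEntrySummary e = "" then summary else pvEntrySummary e
        else summary)
      (pyOrS (d.get? oid) c) := by
  induction l with
  | nil => intro d; rfl
  | cons e t ih =>
    intro d
    have hs : pvEntrySummary e ≠ "" := hne e (by simp)
    have hinit : pyOrS ((d.insert (pvEntryOptionId e) (pvEntrySummary e)).get? oid) c
        = (if pvEntryOptionId e = oid then
            if pvEntrySummary e = "" then pyOrS (d.get? oid) c else pvEntrySummary e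
          else pyOrS (d.get? oid) c) := by
      by_cases h : pvEntryOptionId e = oid
      · subst h
        rw [PySem.Dict.get?_insert_self]
        simp [pyOrS, hs]
      · rw [PySem.Dict.get?_insert_of_ne _ _ (fun hh => h hh.symm)]
        simp [h]
    rw [List.foldl_cons, List.foldl_cons,
      ih (fun x hx => hne x (by simp [hx])), hinit]

-- B's scan over all entries equals the scan over the entries A keeps, for oid ∈ option_ids
lemma pv_filter_fold (value : List (List (String × String))) (option_ids : List String)
    (oid : String) (hmem : oid ∈ option_ids) :
    ∀ init : String,
    value.foldl (fun summary entry =>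
      if pvEntryOptionId entry = oid then
        if pvEntrySummary entry = "" then summary else pvEntrySummary entry
      else summary) init
    = (value.filter (pvKeep option_ids)).foldl (fun summary entry =>
      if pvEntryOptionId entry = oid then
        if pvEntrySummary entry = "" then summary else pvEntrySummary entry
      else summary) init := by
  induction value with
  | nil => intro init; rfl
  | cons e t ih =>
    intro init
    by_cases hk : pvKeep option_ids e
    · simp only [List.filter_cons, hk, if_true, List.foldl_cons, ih]
    · have hk' : pvKeep option_ids e = false := by simpa using hk
      have : (if pvEntryOptionId e = oid then
          if pvEntrySummary e = "" then init else pvEntrySummary e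
        else init) = init := by
        by_cases h1 : pvEntryOptionId e = oid
        · have h2 : pvEntrySummary e = "" := by
            by_contra h2
            apply hk
            simp [pvKeep, h1, h2, hmem]
          simp [h1, h2]
        · simp [h1]
      simp only [List.filter_cons, hk', Bool.false_eq_true, if_false, List.foldl_cons, this, ih]

-- ===== VERDICT (by name: the statement is the Claim_ definition above) =====
theorem normalize_code_blame_commit_reviews_py_spec : Claim_equal_normalize_code_blame_commit_reviews_py := by
  intro value option_ids _
  show _ = _
  unfold normalize_code_blame_commit_reviews_py normalize_code_blame_commit_reviews_py_alt
  rw [pv_cleaned_eq value option_ids]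
  dsimp only
  rw [List.foldl_map, PySem.List.foldl_append_singleton_eq_map]
  simp only [List.nil_append]
  refine List.map_congr_left (fun oid hoid => ?_)
  have hrow : (fun (d : PySem.Dict String String)
        (e : List (String × String)) =>
        d.insert ((pvAGet [("optionId", pvEntryOptionId e), ("summary", pvEntrySummary e)] "optionId").getD "")
          ((pvAGet [("optionId", pvEntryOptionId e), ("summary", pvEntrySummary e)] "summary").getD ""))
      = (fun d e => d.insert (pvEntryOptionId e) (pvEntrySummary e)) := by
    funext d e
    simp [pvAGet, List.find?]
  rw [hrow, pv_dict_fold _ oid _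
    (fun e he => by
      have := (List.mem_filter.mp he).2
      simp [pvKeep, Bool.and_eq_true] at this
      exact this.2),
    pvSummaryFor, pv_filter_fold value option_ids oid hoid]
  rfl
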